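-- pv_equiv track=rewrite | github.com/inogomovfozil01-sys/Coins-bot | bot.py | escape_html_safe
-- ===== SOURCE A (Python) =====
-- def escape_html_safe(text: str) -> str:
--     text = str(text)
--     text = text.replace("&", "&amp;")
--     text = text.replace("<", "&lt;")
--     text = text.replace(">", "&gt;")
--
--
--     allowed = ["b", "i", "u", "s", "code", "pre"]
--     for tag in allowed:
--         text = text.replace(f"&lt;{tag}&gt;", f"<{tag}>")
--         text = text.replace(f"&lt;/{tag}&gt;", f"</{tag}>")
--
--     return text
-- ===== SOURCE B (Python) =====
-- def escape_html_safe(text: str) -> str: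
--     # One left-to-right scan: escape &, <, > as entities, but when a '<' starts
--     # an exact allowed tag (optionally closing) emit the tag literally and skip it.
--     text = str(text)
--     allowed = ["b", "i", "u", "s", "code", "pre"]
--     out = []
--     i = 0
--     n = len(text)
--     while i < n:
--         c = text[i]
--         if c == '<':
--             m = None
--             for tag in allowed:
--                 for t in (tag, '/' + tag):
--                     if text.startswith(t + '>', i + 1):
--                         m = t
--                         break
--                 if m is not None:
--                     break
--             if m is not None:
--                 out.append('<' + m + '>')
--                 i += len(m) + 2
--             else:
--                 out.append('&lt;')
--                 i += 1
--         elif c == '>':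
--             out.append('&gt;')
--             i += 1
--         elif c == '&':
--             out.append('&amp;')
--             i += 1
--         else:
--             out.append(c)
--             i += 1
--     return ''.join(out)
-- ===== Notes on version B (the rewrite author's own statement) =====
-- stated objective: alternative
-- what changed: A escapes every ampersand and angle bracket with three full replace passes and then runs twelve more replace passes to un-escape the whitelisted tags; B makes a single left-to-right scan that escapes each character on the fly but, when an opening angle bracket exactly starts an allowed (optionally closing) tag, emits that tag literally and skips past it.
import Mathlib
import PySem

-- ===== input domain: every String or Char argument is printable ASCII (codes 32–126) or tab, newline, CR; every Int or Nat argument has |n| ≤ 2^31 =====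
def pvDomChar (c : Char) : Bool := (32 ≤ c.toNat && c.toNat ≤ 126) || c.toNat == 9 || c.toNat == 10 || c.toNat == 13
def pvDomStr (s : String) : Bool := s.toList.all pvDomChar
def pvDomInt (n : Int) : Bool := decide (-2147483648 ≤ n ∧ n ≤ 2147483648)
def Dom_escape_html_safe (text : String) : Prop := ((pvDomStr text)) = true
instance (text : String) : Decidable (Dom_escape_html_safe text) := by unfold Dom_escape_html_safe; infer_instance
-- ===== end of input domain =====

-- B replaces A's escape-then-restore replace chain (15 full passes over the string) by a single
-- left-to-right scan that escapes each special character but emits an allowed tag literally when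
-- an opening angle bracket starts one; objective: alternative single-pass algorithm (not claimed faster).

-- ===== PORT A =====
def escape_html_safe (text : String) : String :=
  let t0 := text
  let t1 := PySem.Str.replace t0 "&" "&amp;"
  let t2 := PySem.Str.replace t1 "<" "&lt;"
  let t3 := PySem.Str.replace t2 ">" "&gt;"
  List.foldl (fun (t : String) (tag : String) =>
      let t' := PySem.Str.replace t ("&lt;" ++ tag ++ "&gt;") ("<" ++ tag ++ ">")
      PySem.Str.replace t' ("&lt;/" ++ tag ++ "&gt;") ("</" ++ tag ++ ">"))
    t3 ["b", "i", "u", "s", "code", "pre"]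

-- ===== PORT B =====
-- the 12 tag forms B probes at an opening angle bracket, in Source B's loop order: tag, then '/'+tag
def pvForms : List (List Char) :=
  [['b'], ['/','b'], ['i'], ['/','i'], ['u'], ['/','u'], ['s'], ['/','s'],
   ['c','o','d','e'], ['/','c','o','d','e'], ['p','r','e'], ['/','p','r','e']]

-- first form tf with text.startswith(tf + '>') at the scan position (Source B's inner loops)
def pvMatch (forms : List (List Char)) (t : List Char) : Option (List Char) :=
  forms.find? (fun tf => (tf ++ ['>']).isPrefixOf t)

-- Source B's while-loop: one pass, emitting one chunk per step
def pvScan (forms : List (List Char)) : List Char → List Char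
  | [] => []
  | '<' :: t =>
    (match pvMatch forms t with
     | some tf => ('<' :: (tf ++ ['>'])) ++ pvScan forms (t.drop (tf.length + 1))
     | none => ['&','l','t',';'] ++ pvScan forms t)
  | '>' :: t => ['&','g','t',';'] ++ pvScan forms t
  | '&' :: t => ['&','a','m','p',';'] ++ pvScan forms t
  | c :: t => c :: pvScan forms t
termination_by l => l.length
decreasing_by all_goals (simp [List.length_drop]; try omega)

def escape_html_safe_alt (text : String) : String :=
  String.ofList (pvScan pvForms text.toList)

-- ===== PRECONDITION & SPEC =====
def Spec_escape_html_safe (text : String) (out : String) : Prop := out = escape_html_safe_alt text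
instance (text : String) (out : String) : Decidable (Spec_escape_html_safe text out) := by unfold Spec_escape_html_safe; infer_instance

-- ===== CLAIM (what is proved, stated in full; the proofs are below) =====
def Claim_equal_escape_html_safe : Prop := ∀ (text : String), Dom_escape_html_safe text → Spec_escape_html_safe text (escape_html_safe text)

-- ===== LEMMAS AND PROOFS =====
def pvRep (old new : List Char) : List Char → List Char
  | [] => []
  | c :: t =>
    if old.isPrefixOf (c :: t) then new ++ pvRep old new (t.drop (old.length - 1))
    else c :: pvRep old new t
termination_by l => l.length
decreasing_by all_goals (simp [List.length_drop]; try omega)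

theorem pvRep_nil (old new : List Char) : pvRep old new [] = [] := by simp [pvRep]

theorem pvRep_cons (old new : List Char) (c : Char) (t : List Char) :
    pvRep old new (c :: t) =
      if old.isPrefixOf (c :: t) then new ++ pvRep old new (t.drop (old.length - 1))
      else c :: pvRep old new t := by
  rw [pvRep]

theorem pv_go_eq_rep (old new : List Char) (h : old ≠ []) :
    ∀ fuel l acc, l.length ≤ fuel →
      PySem.Chars.replace.go old new fuel l acc = acc.reverse ++ pvRep old new l := by
  intro fuel
  induction fuel with
  | zero =>
    intro l acc hl
    have : l = [] := by
      cases l <;> simp_all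
    subst this
    simp [PySem.Chars.replace.go, pvRep_nil]
  | succ f ih =>
    intro l acc hl
    cases l with
    | nil => simp [PySem.Chars.replace.go, pvRep_nil]
    | cons c t =>
      rw [PySem.Chars.replace.go]
      rw [pvRep_cons]
      by_cases hp : old.isPrefixOf (c :: t)
      · simp only [hp, if_true]
        have hol : 1 ≤ old.length := by
          cases old <;> simp_all
        have hdrop : (c :: t).drop old.length = t.drop (old.length - 1) := by
          cases old with
          | nil => simp_all
          | cons o os => simp
        rw [hdrop, ih _ _ (by simp [List.length_drop] at hl ⊢; omega)]
        simp
      · simp only [hp, if_false, Bool.false_eq_true]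
        rw [ih _ _ (by simp at hl ⊢; omega)]
        simp

theorem pv_replace_eq_rep (s old new : List Char) (h : old ≠ []) :
    PySem.Chars.replace s old new = pvRep old new s := by
  rw [PySem.Chars.replace]
  have : old.isEmpty = false := by simp [h]
  rw [this]
  simp only [Bool.false_eq_true, if_false]
  rw [pv_go_eq_rep old new h s.length s [] (le_refl _)]
  simp

theorem pvRep_consume (old new Y : List Char) (h : old ≠ []) :
    pvRep old new (old ++ Y) = new ++ pvRep old new Y := by
  obtain ⟨o, os, rfl⟩ := List.exists_cons_of_ne_nil h
  rw [List.cons_append, pvRep_cons]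
  have hp : (o :: os).isPrefixOf (o :: (os ++ Y)) = true := by
    rw [List.isPrefixOf_iff_prefix]
    exact (List.cons_prefix_cons).2 ⟨rfl, List.prefix_append os Y⟩
  rw [hp]
  simp

theorem pvRep_skip (old new : List Char) : ∀ (X Y : List Char),
    (∀ i, i < X.length → ¬ old <+: (X.drop i ++ Y)) →
    pvRep old new (X ++ Y) = X ++ pvRep old new Y := by
  intro X
  induction X with
  | nil => intro Y _; simp
  | cons c X' ih =>
    intro Y hno
    rw [List.cons_append, pvRep_cons]
    have hp : old.isPrefixOf (c :: (X' ++ Y)) = false := by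
      rw [Bool.eq_false_iff]
      intro hc
      rw [List.isPrefixOf_iff_prefix] at hc
      exact hno 0 (by simp) (by simpa using hc)
    rw [hp]
    simp only [Bool.false_eq_true, if_false]
    rw [ih Y (fun i hi => by simpa using hno (i + 1) (by simp; omega))]
    simp

def pvNS (c : Char) : Prop := c ≠ '<' ∧ c ≠ '>' ∧ c ≠ '&'

theorem pvScan_nil (fs : List (List Char)) : pvScan fs [] = [] := by simp [pvScan]

theorem pvScan_lt (fs : List (List Char)) (t : List Char) :
    pvScan fs ('<' :: t) =
      (match pvMatch fs t with
       | some tf => ('<' :: (tf ++ ['>'])) ++ pvScan fs (t.drop (tf.length + 1))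
       | none => ['&','l','t',';'] ++ pvScan fs t) := by
  rw [pvScan]

theorem pvScan_gt (fs : List (List Char)) (t : List Char) :
    pvScan fs ('>' :: t) = ['&','g','t',';'] ++ pvScan fs t := by rw [pvScan]

theorem pvScan_amp (fs : List (List Char)) (t : List Char) :
    pvScan fs ('&' :: t) = ['&','a','m','p',';'] ++ pvScan fs t := by rw [pvScan]

theorem pvScan_plain (fs : List (List Char)) (c : Char) (t : List Char) (h : pvNS c) :
    pvScan fs (c :: t) = c :: pvScan fs t := by
  obtain ⟨h1, h2, h3⟩ := h
  rw [pvScan.eq_def]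
  split <;> simp_all

def pvPat (tf : List Char) : List Char := ['&','l','t',';'] ++ tf ++ ['&','g','t',';']
def pvLit (tf : List Char) : List Char := '<' :: (tf ++ ['>'])

-- no occurrence of a pattern can start inside a chunk with no '&'
theorem pv_noamp (tf Y : List Char) (X : List Char) (hX : ∀ x ∈ X, x ≠ '&') :
    ∀ i, i < X.length → ¬ pvPat tf <+: (X.drop i ++ Y) := by
  intro i hi hc
  have h0 : (pvPat tf)[0]'(by simp [pvPat]) = (X.drop i ++ Y)[0]'(by simp; omega) :=
    hc.getElem (by simp [pvPat])
  have hx : (X.drop i ++ Y)[0]'(by simp; omega) = X[i]'hi := by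
    rw [List.getElem_append_left (by simp; omega)]
    simp
  have : X[i]'hi = '&' := by
    rw [← hx, ← h0]; simp [pvPat]
  exact hX _ (List.getElem_mem hi) this

theorem pv_npp_gt (tf Y : List Char) :
    ∀ i, i < 4 → ¬ pvPat tf <+: (List.drop i ['&','g','t',';'] ++ Y) := by
  intro i hi hc
  interval_cases i <;> simp_all [pvPat, List.cons_prefix_cons]

theorem pv_npp_amp (tf Y : List Char) :
    ∀ i, i < 5 → ¬ pvPat tf <+: (List.drop i ['&','a','m','p',';'] ++ Y) := by
  intro i hi hc
  interval_cases i <;> simp_all [pvPat, List.cons_prefix_cons]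

theorem pv_npp_lt_tail (tf Y : List Char) :
    ∀ i, 1 ≤ i → i < 4 → ¬ pvPat tf <+: (List.drop i ['&','l','t',';'] ++ Y) := by
  intro i h1 hi hc
  interval_cases i <;> simp_all [pvPat, List.cons_prefix_cons]

theorem pv_pat_prefix_lt (tf Y : List Char) :
    pvPat tf <+: (['&','l','t',';'] ++ Y) ↔ (tf ++ ['&','g','t',';']) <+: Y := by
  simp [pvPat, List.cons_prefix_cons]

theorem pvScan_plain_append (fs : List (List Char)) :
    ∀ (u w : List Char), (∀ c ∈ u, pvNS c) → pvScan fs (u ++ w) = u ++ pvScan fs w := by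
  intro u
  induction u with
  | nil => simp
  | cons c u' ih =>
    intro w hu
    rw [List.cons_append, pvScan_plain fs c _ (hu c (by simp))]
    rw [ih w (fun d hd => hu d (by simp [hd]))]
    simp

theorem pv_pref (fs : List (List Char)) :
    ∀ (w u : List Char), (∀ c ∈ u, pvNS c) →
      (u ++ ['&','g','t',';']) <+: pvScan fs w → (u ++ ['>']) <+: w := by
  intro w
  induction w with
  | nil =>
    intro u _ h
    rw [pvScan_nil] at h
    simp at h
  | cons c t ih =>
    intro u hu h
    by_cases hc : c = '<'
    · subst hc
      rw [pvScan_lt] at h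
      cases hm : pvMatch fs t with
      | some tf' =>
        rw [hm] at h
        cases u with
        | nil => simp [List.cons_prefix_cons] at h
        | cons d u' =>
          simp only [List.cons_append, List.cons_prefix_cons] at h
          exact absurd h.1 (hu d (by simp)).1
      | none =>
        rw [hm] at h
        cases u with
        | nil => simp [List.cons_prefix_cons] at h
        | cons d u' =>
          simp only [List.cons_append, List.cons_prefix_cons] at h
          exact absurd h.1 (hu d (by simp)).2.2
    · by_cases hc2 : c = '>'
      · subst hc2
        cases u with
        | nil => simp
        | cons d u' =>
          rw [pvScan_gt] at h
          simp only [List.cons_append, List.cons_prefix_cons] at h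
          exact absurd h.1 (hu d (by simp)).2.2
      · by_cases hc3 : c = '&'
        · subst hc3
          rw [pvScan_amp] at h
          cases u with
          | nil => simp [List.cons_prefix_cons] at h
          | cons d u' =>
            simp only [List.cons_append, List.cons_prefix_cons] at h
            exact absurd h.1 (hu d (by simp)).2.2
        · rw [pvScan_plain fs c t ⟨hc, hc2, hc3⟩] at h
          cases u with
          | nil =>
            simp only [List.nil_append, List.cons_prefix_cons] at h
            exact absurd h.1.symm hc3
          | cons d u' =>
            simp only [List.cons_append, List.cons_prefix_cons] at h
            obtain ⟨rfl, h2⟩ := h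
            exact (List.cons_prefix_cons).2 ⟨rfl, ih u' (fun e he => hu e (by simp [he])) h2⟩

theorem pv_step (fs : List (List Char)) (hfs : ∀ f ∈ fs, ∀ c ∈ f, pvNS c)
    (tf : List Char) (htf : ∀ c ∈ tf, pvNS c) :
    ∀ (w : List Char), pvRep (pvPat tf) (pvLit tf) (pvScan fs w) = pvScan (fs ++ [tf]) w := by
  have hpatne : pvPat tf ≠ [] := by simp [pvPat]
  suffices H : ∀ (n : Nat) (w : List Char), w.length ≤ n →
      pvRep (pvPat tf) (pvLit tf) (pvScan fs w) = pvScan (fs ++ [tf]) w by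
    exact fun w => H w.length w le_rfl
  intro n
  induction n with
  | zero =>
    intro w hw
    have : w = [] := by cases w <;> simp_all
    subst this
    simp [pvScan_nil, pvRep_nil]
  | succ n ih =>
    intro w hw
    cases w with
    | nil => simp [pvScan_nil, pvRep_nil]
    | cons c t =>
      simp only [List.length_cons, Nat.add_le_add_iff_right] at hw
      by_cases hc : c = '<'
      · subst hc
        rw [pvScan_lt, pvScan_lt]
        cases hm : pvMatch fs t with
        | some tf' =>
          have hm2 : pvMatch (fs ++ [tf]) t = some tf' := by
            rw [pvMatch] at hm ⊢
            rw [List.find?_append, hm]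
            rfl
          rw [hm2]
          have htf' : ∀ x ∈ ('<' :: (tf' ++ ['>'])), x ≠ '&' := by
            intro x hx
            rcases List.mem_cons.1 hx with rfl | hx
            · decide
            rcases List.mem_append.1 hx with hx | hx
            · have := hfs tf' (List.mem_of_find?_eq_some hm) x hx
              exact this.2.2
            · simp at hx; subst hx; decide
          rw [pvRep_skip _ _ _ _ (pv_noamp tf _ _ htf')]
          rw [ih _ (by simp [List.length_drop]; omega)]
        | none =>
          have hmn : List.find? (fun g => (g ++ ['>']).isPrefixOf t) fs = none := by
            rw [pvMatch] at hm; exact hm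
          by_cases hpre : (tf ++ ['>']).isPrefixOf t = true
          · have hm2 : pvMatch (fs ++ [tf]) t = some tf := by
              rw [pvMatch, List.find?_append, hmn]
              simp [List.find?, hpre]
            rw [hm2]
            obtain ⟨r, rfl⟩ := List.isPrefixOf_iff_prefix.1 hpre
            have hscan : pvScan fs ((tf ++ ['>']) ++ r) = tf ++ (['&','g','t',';'] ++ pvScan fs r) := by
              rw [List.append_assoc, List.singleton_append, pvScan_plain_append fs tf _ htf, pvScan_gt]
            rw [hscan]
            have hassoc : (['&','l','t',';'] ++ (tf ++ (['&','g','t',';'] ++ pvScan fs r)))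
                = pvPat tf ++ pvScan fs r := by
              simp [pvPat]
            rw [hassoc, pvRep_consume _ _ _ hpatne]
            have hr : r.length ≤ n := by
              simp at hw; omega
            rw [ih _ hr]
            have hdrop : ((tf ++ ['>']) ++ r).drop (tf.length + 1) = r :=
              List.drop_left' (by simp)
            simp [pvLit]
          · have hm2 : pvMatch (fs ++ [tf]) t = none := by
              rw [pvMatch, List.find?_append, hmn]
              simp [List.find?, hpre]
            rw [hm2]
            have hno : ∀ i, i < (['&','l','t',';'] : List Char).length →
                ¬ pvPat tf <+: (List.drop i ['&','l','t',';'] ++ pvScan fs t) := by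
              intro i hi
              match i with
              | 0 =>
                intro hcon
                rw [List.drop_zero, pv_pat_prefix_lt] at hcon
                have := pv_pref fs t tf htf hcon
                rw [← List.isPrefixOf_iff_prefix] at this
                exact hpre this
              | (j+1) => exact pv_npp_lt_tail tf _ (j+1) (by omega) (by simpa using hi)
            rw [pvRep_skip _ _ _ _ hno]
            rw [ih _ hw]
      · by_cases hc2 : c = '>'
        · subst hc2
          rw [pvScan_gt, pvScan_gt, pvRep_skip _ _ _ _ (fun i hi => pv_npp_gt tf _ i (by simpa using hi)),
              ih _ hw]
        · by_cases hc3 : c = '&'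
          · subst hc3
            rw [pvScan_amp, pvScan_amp, pvRep_skip _ _ _ _ (fun i hi => pv_npp_amp tf _ i (by simpa using hi)),
                ih _ hw]
          · rw [pvScan_plain fs c t ⟨hc, hc2, hc3⟩, pvScan_plain (fs ++ [tf]) c t ⟨hc, hc2, hc3⟩]
            have : (c :: pvScan fs t) = [c] ++ pvScan fs t := rfl
            rw [this, pvRep_skip _ _ _ _ (pv_noamp tf _ _ (by intro x hx; simp at hx; subst hx; exact hc3)),
                ih _ hw]
            rfl

theorem pv_fold : ∀ (todo done : List (List Char)),
    (∀ f ∈ done ++ todo, ∀ c ∈ f, pvNS c) → ∀ (w : List Char),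
    todo.foldl (fun s g => pvRep (pvPat g) (pvLit g) s) (pvScan done w) = pvScan (done ++ todo) w := by
  intro todo
  induction todo with
  | nil => intro done _ w; simp
  | cons tf todo' ih =>
    intro done hgood w
    rw [List.foldl_cons]
    rw [pv_step done (fun f hf => hgood f (by simp [hf])) tf (hgood tf (by simp))]
    have := ih (done ++ [tf]) (by intro f hf; apply hgood; simp at hf ⊢; tauto) w
    rw [this]
    simp

def pvEsc (c : Char) : List Char :=
  if c = '&' then ['&','a','m','p',';']
  else if c = '<' then ['&','l','t',';']
  else if c = '>' then ['&','g','t',';']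
  else [c]

theorem pvRep_single (a : Char) (new : List Char) :
    ∀ l, pvRep [a] new l = l.flatMap (fun c => if c = a then new else [c]) := by
  intro l
  induction l with
  | nil => simp [pvRep_nil]
  | cons c t ih =>
    rw [pvRep_cons]
    by_cases hca : c = a
    · subst hca
      have : ([c] : List Char).isPrefixOf (c :: t) = true := by
        simp [List.isPrefixOf]
      rw [this]
      simp [ih]
    · have : ([a] : List Char).isPrefixOf (c :: t) = false := by
        simp [List.isPrefixOf]
        exact fun h => absurd h.symm hca
      rw [this]
      simp [ih, hca]

theorem pv_scan_nil_forms : ∀ (w : List Char), pvScan [] w = w.flatMap pvEsc := by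
  intro w
  induction w with
  | nil => simp [pvScan_nil]
  | cons c t ih =>
    by_cases hc : c = '<'
    · subst hc
      rw [pvScan_lt]
      have : pvMatch [] t = none := rfl
      rw [this]
      simp [ih, pvEsc]
    · by_cases hc2 : c = '>'
      · subst hc2; rw [pvScan_gt]; simp [ih, pvEsc]
      · by_cases hc3 : c = '&'
        · subst hc3; rw [pvScan_amp]; simp [ih, pvEsc]
        · rw [pvScan_plain _ _ _ ⟨hc, hc2, hc3⟩]; simp [ih, pvEsc, hc, hc2, hc3]

theorem pv_escape_chain (w : List Char) :
    pvRep ['>'] ['&','g','t',';'] (pvRep ['<'] ['&','l','t',';'] (pvRep ['&'] ['&','a','m','p',';'] w))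
      = w.flatMap pvEsc := by
  rw [pvRep_single, pvRep_single, pvRep_single, List.flatMap_assoc, List.flatMap_assoc]
  apply List.flatMap_congr
  intro c _
  by_cases hc : c = '&'
  · subst hc; decide
  · by_cases hc2 : c = '<'
    · subst hc2; decide
    · by_cases hc3 : c = '>'
      · subst hc3; decide
      · simp [pvEsc, hc, hc2, hc3]

theorem pv_a_list (text : String) : (escape_html_safe text).toList =
    List.foldl (fun s g => pvRep (pvPat g) (pvLit g) s)
      (pvRep ['>'] ['&','g','t',';'] (pvRep ['<'] ['&','l','t',';'] (pvRep ['&'] ['&','a','m','p',';'] text.toList))) pvForms := by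
  have hrep : ∀ (s : List Char) (g : List Char), PySem.Chars.replace s (pvPat g) (pvLit g) = pvRep (pvPat g) (pvLit g) s :=
    fun s g => pv_replace_eq_rep _ _ _ (by simp [pvPat])
  have hpat : ∀ (g : String), ("&lt;" ++ g ++ "&gt;" : String).toList = pvPat g.toList := by
    intro g; simp [pvPat, String.toList_append]
  have hpatc : ∀ (g : String), ("&lt;/" ++ g ++ "&gt;" : String).toList = pvPat ('/' :: g.toList) := by
    intro g; simp [pvPat, String.toList_append]
  have hlit : ∀ (g : String), ("<" ++ g ++ ">" : String).toList = pvLit g.toList := by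
    intro g; simp [pvLit, String.toList_append]
  have hlitc : ∀ (g : String), ("</" ++ g ++ ">" : String).toList = pvLit ('/' :: g.toList) := by
    intro g; simp [pvLit, String.toList_append]
  simp only [escape_html_safe, List.foldl_cons, List.foldl_nil, pvForms,
    PySem.Str.toList_replace, hpat, hpatc, hlit, hlitc, hrep]
  rw [pv_replace_eq_rep _ _ _ (by decide), pv_replace_eq_rep _ _ _ (by decide),
      pv_replace_eq_rep _ _ _ (by decide)]
  simp

theorem pv_main (text : String) : escape_html_safe text = escape_html_safe_alt text := by
  have hgood : ∀ f ∈ ([] : List (List Char)) ++ pvForms, ∀ c ∈ f, pvNS c := by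
    simp only [List.nil_append, pvNS, pvForms]
    intro f hf c hc
    fin_cases hf <;> fin_cases hc <;> exact ⟨by decide, by decide, by decide⟩
  have h1 := pv_fold pvForms [] hgood text.toList
  have h2 : (escape_html_safe text).toList = pvScan pvForms text.toList := by
    rw [pv_a_list, pv_escape_chain, ← pv_scan_nil_forms]
    simpa using h1
  calc escape_html_safe text = String.ofList (escape_html_safe text).toList := by simp
    _ = String.ofList (pvScan pvForms text.toList) := by rw [h2]
    _ = escape_html_safe_alt text := rfl

-- ===== VERDICT (by name: the statement is the Claim_ definition above) =====
theorem escape_html_safe_spec : Claim_equal_escape_html_safe := by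
  intro text _
  unfold Spec_escape_html_safe
  exact pv_main text
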